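-- pv_equiv track=rewrite | github.com/Zeydel/Everybody-Codes | The Kingdom of Algorithmia/Quest06/Quest06_part1.py | get_path_with_unique_length
-- ===== SOURCE A (Python) =====
-- def get_path_with_unique_length(paths):
--
--     # Store lengths in a dictionary
--     lengths = dict()
--
--     # For every path
--     for path in paths:
--
--         # Add its length to the dictionary
--         if len(path) not in lengths:
--             lengths[len(path)] = 0
--
--         lengths[len(path)] += 1
--
--     # Init var for the unique length
--     unique_length = -1
--
--     # For every length found
--     for length in lengths:
--
--         # If the length only has one instance
--         if lengths[length] == 1:
--
--             # Set the unique length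
--             unique_length = length
--
--     # For every path
--     for path in paths:
--
--         # If the length matches the unique length, return the path
--         if len(path) == unique_length:
--             return path
-- ===== SOURCE B (Python) =====
-- def get_path_with_unique_length(paths):
--     # Dict order is first-occurrence order and a uniquely-occurring length occurs
--     # exactly once, so A's answer is simply the LAST path whose length occurs
--     # exactly once in paths. Scan from the back and return the first such path.
--     lens = [len(p) for p in paths]
--     for p in reversed(paths):
--         if lens.count(len(p)) == 1:
--             return p
--     return None
-- ===== Notes on version B (the rewrite author's own statement) =====
-- stated objective: alternative
-- what changed: B drops A's dictionary entirely: since dict order is first-occurrence order and a unique length occurs exactly once, A's answer is the last path whose length occurs exactly once, so B scans paths from the back and returns the first path whose length has count 1 in the length list.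
import Mathlib
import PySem

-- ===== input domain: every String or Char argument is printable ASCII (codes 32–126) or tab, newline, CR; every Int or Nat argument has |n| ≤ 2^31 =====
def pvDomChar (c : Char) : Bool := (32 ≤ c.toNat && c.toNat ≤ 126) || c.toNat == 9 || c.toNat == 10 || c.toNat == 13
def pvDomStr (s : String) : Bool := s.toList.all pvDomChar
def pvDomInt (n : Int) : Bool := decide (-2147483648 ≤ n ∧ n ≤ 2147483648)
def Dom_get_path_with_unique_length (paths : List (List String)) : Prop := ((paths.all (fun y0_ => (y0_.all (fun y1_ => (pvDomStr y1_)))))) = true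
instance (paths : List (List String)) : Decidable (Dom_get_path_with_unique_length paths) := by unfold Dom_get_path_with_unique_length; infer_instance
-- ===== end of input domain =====

-- B drops A's dictionary machinery: the answer is the last path whose length occurs exactly
-- once, found by a backward scan with a count test ('alternative'; not claimed faster).

-- ===== PORT A =====
def get_path_with_unique_length (paths : List (List String)) : Option (List String) :=
  let lengths : PySem.Dict Int Int :=
    paths.foldl (fun d path =>
      -- if len(path) not in lengths: lengths[len(path)] = 0
      let d := if d.contains ((path.length : Int)) then d
               else d.insert ((path.length : Int)) 0
      -- lengths[len(path)] += 1   (key is present here, so getD 0 is exact)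
      d.insert ((path.length : Int)) (d.getD ((path.length : Int)) 0 + 1)) PySem.Dict.empty
  let unique_length : Int :=
    -- lengths[length] with length a key of the dict, so getD 0 is exact
    lengths.keys.foldl (fun u length => if lengths.getD length 0 == 1 then length else u) (-1)
  -- third loop with early return = first match
  paths.find? (fun path => ((path.length : Int)) == unique_length)

-- ===== PORT B =====
def get_path_with_unique_length_alt (paths : List (List String)) : Option (List String) :=
  let lens := paths.map (fun p => (p.length : Int))
  -- for p in reversed(paths): if lens.count(len(p)) == 1: return p
  paths.reverse.find? (fun p => PySem.List.count lens ((p.length : Int)) == 1)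

-- ===== PRECONDITION & SPEC =====
def Spec_get_path_with_unique_length (paths : List (List String)) (out : Option (List String)) : Prop := out = get_path_with_unique_length_alt paths
instance (paths : List (List String)) (out : Option (List String)) : Decidable (Spec_get_path_with_unique_length paths out) := by unfold Spec_get_path_with_unique_length; infer_instance

-- ===== CLAIM (what is proved, stated in full; the proofs are below) =====
def Claim_equal_get_path_with_unique_length : Prop := ∀ (paths : List (List String)), Dom_get_path_with_unique_length paths → Spec_get_path_with_unique_length paths (get_path_with_unique_length paths)

-- ===== LEMMAS AND PROOFS =====

-- A's "init to 0 if absent, then += 1" step is the plain counting insert.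
theorem stepA_eq_count (d : PySem.Dict Int Int) (k : Int) :
    (let d' := if d.contains k then d else d.insert k 0;
     d'.insert k (d'.getD k 0 + 1)) = d.insert k (d.getD k 0 + 1) := by
  by_cases h : d.contains k = true
  · simp [h]
  · simp only [Bool.not_eq_true] at h
    simp [h, PySem.Dict.getD_insert_self, PySem.Dict.insert_insert_self,
      PySem.Dict.getD_of_not_contains d 0 h]

-- A's counting loop builds Counter(map(len, paths)).
theorem countsA_eq (paths : List (List String)) :
    paths.foldl (fun d path =>
      let d := if d.contains ((path.length : Int)) then d
               else d.insert ((path.length : Int)) 0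
      d.insert ((path.length : Int)) (d.getD ((path.length : Int)) 0 + 1)) PySem.Dict.empty
    = PySem.Dict.counter (paths.map (fun p => (p.length : Int))) := by
  have h : (fun (d : PySem.Dict Int Int) (path : List String) =>
      let d := if d.contains ((path.length : Int)) then d
               else d.insert ((path.length : Int)) 0
      d.insert ((path.length : Int)) (d.getD ((path.length : Int)) 0 + 1))
      = fun d path => d.insert ((path.length : Int)) (d.getD ((path.length : Int)) 0 + 1) := by
    funext d path; exact stepA_eq_count d _
  rw [h, ← PySem.Dict.foldl_insert_getD_add_one_eq_counter, List.foldl_map]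

-- 'for x in reversed(l): if p(x): return x' is the last element of l satisfying p.
theorem find?_reverse_eq (l : List (List String)) (p : List String → Bool) :
    l.reverse.find? p = (l.filter p).getLast? := by
  induction l with
  | nil => rfl
  | cons x xs ih =>
    rw [List.reverse_cons, List.find?_append, ih, List.filter_cons]
    cases hp : p x
    · simp [List.find?, hp]
    · rw [if_pos rfl, List.getLast?_cons]
      cases hF : (xs.filter p).getLast? <;> simp [List.find?, hp, Option.or]

-- 'keep the last x with p(x)' as a fold is getLastD of the filtered list.
theorem foldl_last_if (pred : Int → Bool) (l : List Int) (init : Int) :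
    l.foldl (fun u x => if pred x then x else u) init = (l.filter pred).getLastD init := by
  induction l generalizing init with
  | nil => rfl
  | cons x xs ih =>
    rw [List.foldl_cons, List.filter_cons]
    cases hp : pred x
    · rw [if_neg (by simp), if_neg (by simp), ih]
    · rw [if_pos rfl, if_pos rfl, ih, List.getLastD_cons]

-- Filtering set(l) by a predicate only true on unique elements equals filtering l itself.
theorem filter_ofList_eq (pred : Int → Bool) (l : List Int)
    (h : ∀ x, pred x = true → List.count x l ≤ 1) :
    (PySem.Set.ofList l).filter pred = l.filter pred := by
  induction l with
  | nil => rfl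
  | cons x xs ih =>
    have hxs : ∀ y, pred y = true → List.count y xs ≤ 1 := by
      intro y hy
      have h1 := h y hy
      rw [List.count_cons] at h1
      omega
    rw [PySem.Set.ofList_cons, List.filter_cons, List.filter_cons]
    cases hp : pred x
    · -- pred x = false: the discarded x never passes the filter anyway
      rw [if_neg (by simp), if_neg (by simp)]
      rw [show (PySem.Set.ofList xs).discard x
            = (PySem.Set.ofList xs).filter (fun y => !(y == x)) from rfl,
        List.filter_filter]
      have hfun : (fun y : Int => pred y && !(y == x)) = pred := by
        funext y
        by_cases hyx : y = x
        · subst hyx; simp [hp]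
        · simp [hyx]
      rw [hfun, ih hxs]
    · -- pred x = true: x occurs once in x::xs, so x ∉ xs and the discard is a no-op
      rw [if_pos rfl, if_pos rfl]
      have hx1 := h x hp
      rw [List.count_cons_self] at hx1
      have hnot : x ∉ xs := List.count_eq_zero.mp (by omega)
      have hdis : (PySem.Set.ofList xs).discard x = PySem.Set.ofList xs := by
        rw [show (PySem.Set.ofList xs).discard x
              = (PySem.Set.ofList xs).filter (fun y => !(y == x)) from rfl]
        apply List.filter_eq_self.mpr
        intro y hy
        have hyxs : y ∈ xs := (PySem.Set.mem_ofList _ _).mp hy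
        simp
        intro he
        exact hnot (he ▸ hyxs)
      rw [hdis, ih hxs]

-- A length occurring exactly once identifies its path: find? returns exactly that path.
theorem find?_of_count_one (paths : List (List String)) (q : List String)
    (hq : q ∈ paths)
    (h1 : List.count ((q.length : Int)) (paths.map (fun p => (p.length : Int))) = 1) :
    paths.find? (fun p => ((p.length : Int)) == ((q.length : Int))) = some q := by
  induction paths with
  | nil => cases hq
  | cons p rest ih =>
    rw [List.map_cons, List.count_cons] at h1
    cases hp : (((p.length : Int)) == ((q.length : Int)))
    · have hne : ((p.length : Int)) ≠ ((q.length : Int)) := by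
        intro he; rw [he] at hp; simp at hp
      have hq' : q ∈ rest := by
        rcases List.mem_cons.mp hq with rfl | h
        · exact absurd rfl hne
        · exact h
      rw [List.find?_cons_of_neg
        (p := fun r : List String => ((r.length : Int)) == ((q.length : Int))) (by simpa using hne)]
      simp only [hp, Bool.false_eq_true, if_false] at h1
      exact ih hq' h1
    · have heq : ((p.length : Int)) = ((q.length : Int)) := by simpa using hp
      rw [List.find?_cons_of_pos
        (p := fun r : List String => ((r.length : Int)) == ((q.length : Int))) hp]
      rcases List.mem_cons.mp hq with rfl | hq'
      · rfl
      · exfalso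
        have hpos : 0 < List.count ((q.length : Int)) (rest.map (fun p => (p.length : Int))) :=
          List.count_pos_iff.mpr (List.mem_map.mpr ⟨q, hq', rfl⟩)
        simp only [hp, if_true] at h1
        omega

-- ===== VERDICT (by name: the statement is the Claim_ definition above) =====
theorem get_path_with_unique_length_spec : Claim_equal_get_path_with_unique_length := by
  intro paths _
  unfold Spec_get_path_with_unique_length get_path_with_unique_length get_path_with_unique_length_alt
  rw [countsA_eq, find?_reverse_eq]
  simp only [PySem.List.count_eq]
  set lens := paths.map (fun p => (p.length : Int)) with hlens
  -- the dict lookup is the list count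
  have hpred : (fun L : Int => (PySem.Dict.counter lens).getD L 0 == 1)
      = (fun L : Int => List.count L lens == 1) := by
    funext L
    rw [PySem.Dict.getD_counter]
    by_cases h : List.count L lens = 1
    · simp [h]
    · simp [h]
  -- A's unique_length is the last uniquely-occurring length
  have hu : (PySem.Dict.counter lens).keys.foldl
        (fun u L => if (PySem.Dict.counter lens).getD L 0 == 1 then L else u) (-1)
      = (lens.filter (fun L => List.count L lens == 1)).getLastD (-1) := by
    rw [PySem.Dict.keys_counter, foldl_last_if, hpred,
      filter_ofList_eq _ _ (by
        intro x hx
        have : List.count x lens = 1 := by simpa using hx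
        omega)]
  rw [hu]
  -- push the filter through the map
  have hFmap : lens.filter (fun L => List.count L lens == 1)
      = (paths.filter (fun p => List.count ((p.length : Int)) lens == 1)).map
          (fun p => (p.length : Int)) := by
    rw [hlens, List.filter_map]
    rfl
  rw [hFmap]
  cases hLast : (paths.filter (fun p => List.count ((p.length : Int)) lens == 1)).getLast? with
  | none =>
    rw [List.getLast?_eq_none_iff.mp hLast]
    rw [List.find?_eq_none]
    intro p _
    simp only [List.map_nil, List.getLastD_nil, beq_iff_eq]
    omega
  | some q =>
    obtain ⟨F', hF'⟩ := List.getLast?_eq_some_iff.mp hLast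
    rw [hF', List.map_append, List.map_cons, List.map_nil, List.getLastD_concat]
    have hqF : q ∈ paths.filter (fun p => List.count ((p.length : Int)) lens == 1) := by
      rw [hF']; exact List.mem_append.mpr (Or.inr (List.mem_cons_self))
    have hqmem : q ∈ paths := List.mem_filter.mp hqF |>.1
    have hqcnt : List.count ((q.length : Int)) lens = 1 := by
      have := (List.mem_filter.mp hqF).2
      simpa using this
    rw [find?_of_count_one paths q hqmem (by rw [← hlens]; exact hqcnt)]
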